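-- pv_equiv track=rewrite | github.com/georgeprice/advent-of-code | 2016/07/day-7.py | is_abba
-- ===== SOURCE A (Python) =====
-- def is_abba(raw: str) -> bool:
--     # base case - check the 4 character string is a palindrome
--     if len(raw) == 4:
--         if len(set(raw)) != 2:
--             return False
--         return raw[0] == raw[3] and raw[1] == raw[2]
--
--     # recursive case - try all 4 character substrings
--     children = []
--     for i in range(len(raw)-3):
--         children += [raw[i:i+4]]
--     return any(map(is_abba, children))
-- ===== SOURCE B (Python) =====
-- def is_abba(raw: str) -> bool:
--     return any(raw[i] == raw[i + 3] and raw[i + 1] == raw[i + 2]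
--                and raw[i] != raw[i + 1]
--                for i in range(len(raw) - 3))
-- ===== Notes on version B (the rewrite author's own statement) =====
-- stated objective: simpler
-- what changed: Replaces A's recursion that materialises every 4-character substring and recursively re-tests each with a single flat index scan testing raw[i]==raw[i+3], raw[i+1]==raw[i+2], raw[i]!=raw[i+1] directly on the string (the distinctness test replaces A's len(set(w))==2 guard).
import Mathlib
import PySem

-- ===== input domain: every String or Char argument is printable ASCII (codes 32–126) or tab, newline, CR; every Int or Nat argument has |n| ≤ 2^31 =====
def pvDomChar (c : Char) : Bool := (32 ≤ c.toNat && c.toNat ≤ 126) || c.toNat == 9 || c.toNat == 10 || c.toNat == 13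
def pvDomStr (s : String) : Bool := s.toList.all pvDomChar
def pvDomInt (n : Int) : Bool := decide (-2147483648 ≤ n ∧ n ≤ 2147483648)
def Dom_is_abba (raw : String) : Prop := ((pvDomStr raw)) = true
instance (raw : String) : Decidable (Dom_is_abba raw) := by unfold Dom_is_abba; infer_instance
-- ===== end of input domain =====

-- B replaces A's recursion over all materialised 4-char substrings by one flat index scan; objective: simpler.

-- ===== PORT A =====
-- children = []; for i in range(len(raw)-3): children += [raw[i:i+4]]
def isAbbaChildren (l : List Char) : List (List Char) :=
  (PySem.List.pyRange 0 ((l.length : Int) - 3) 1).foldl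
    (fun acc i => acc ++ [PySem.List.slice l (some i) (some (i + 4))]) []

-- every child is a 4-character window (used only for termination of isAbbaA)
theorem isAbbaChildren_len {l : List Char} {c : List Char}
    (hc : c ∈ isAbbaChildren l) : c.length = 4 := by
  unfold isAbbaChildren at hc
  rw [PySem.List.foldl_append_singleton_eq_map] at hc
  simp only [List.nil_append, List.mem_map] at hc
  obtain ⟨i, hi, rfl⟩ := hc
  rw [PySem.List.mem_pyRange_one] at hi
  rw [PySem.List.slice_toNat _ hi.1 (by omega)]
  simp only [List.length_take, List.length_drop]
  omega

def isAbbaA (l : List Char) : Bool :=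
  if hlen4 : l.length = 4 then
    -- base case
    if (PySem.Set.ofList l).length ≠ 2 then false
    else (PySem.List.pyGet? l 0 == PySem.List.pyGet? l 3) &&
         (PySem.List.pyGet? l 1 == PySem.List.pyGet? l 2)
  else
    -- recursive case: any(map(is_abba, children))
    (isAbbaChildren l).attach.any (fun c => isAbbaA c.1)
termination_by (if l.length = 4 then 0 else 1)
decreasing_by
  simp only [hlen4, if_false, isAbbaChildren_len c.2, if_true]
  omega

def is_abba (raw : String) : Bool := isAbbaA raw.toList

-- ===== PORT B =====
def isAbbaAltCore (l : List Char) : Bool :=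
  (PySem.List.pyRange 0 ((l.length : Int) - 3) 1).any (fun i =>
    (PySem.List.pyGet? l i == PySem.List.pyGet? l (i + 3)) &&
    (PySem.List.pyGet? l (i + 1) == PySem.List.pyGet? l (i + 2)) &&
    !(PySem.List.pyGet? l i == PySem.List.pyGet? l (i + 1)))

def is_abba_alt (raw : String) : Bool := isAbbaAltCore raw.toList

-- ===== PRECONDITION & SPEC =====
def Spec_is_abba (raw : String) (out : Bool) : Prop := out = is_abba_alt raw
instance (raw : String) (out : Bool) : Decidable (Spec_is_abba raw out) := by unfold Spec_is_abba; infer_instance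

-- ===== CLAIM (what is proved, stated in full; the proofs are below) =====
def Claim_equal_is_abba : Prop := ∀ (raw : String), Dom_is_abba raw → Spec_is_abba raw (is_abba raw)

-- ===== LEMMAS AND PROOFS =====

-- A's base-case test on a 4-char window equals B's window predicate
theorem isAbbaA_four (a b c d : Char) :
    isAbbaA [a, b, c, d] = ((a == d) && (b == c) && !(a == b)) := by
  rw [isAbbaA]
  by_cases hab : a = b <;> by_cases hac : a = c <;> by_cases had : a = d <;>
    by_cases hbc : b = c <;> by_cases hbd : b = d <;> by_cases hcd : c = d <;>
      (simp_all [PySem.Set.ofList, PySem.Set.add, PySem.Set.contains,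
        PySem.List.pyGet?, PySem.List.pyIdx?] <;> split_ifs <;> simp_all)

-- A on the window raw[i:i+4] equals B's predicate at index i
theorem window_eq (l : List Char) (i : Int) (h0 : 0 ≤ i) (h : i < (l.length : Int) - 3) :
    isAbbaA (PySem.List.slice l (some i) (some (i + 4))) =
      ((PySem.List.pyGet? l i == PySem.List.pyGet? l (i + 3)) &&
       (PySem.List.pyGet? l (i + 1) == PySem.List.pyGet? l (i + 2)) &&
       !(PySem.List.pyGet? l i == PySem.List.pyGet? l (i + 1))) := by
  obtain ⟨n, rfl⟩ := Int.eq_ofNat_of_zero_le h0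
  have hn : n + 4 ≤ l.length := by omega
  have hslice : PySem.List.slice l (some (n : Int)) (some ((n : Int) + 4)) =
      [l[n], l[n + 1], l[n + 2], l[n + 3]] := by
    rw [show ((n : Int) + 4) = ((n : Int) + ((4 : Nat) : Int)) by norm_num,
      PySem.List.slice_natCast_add]
    refine List.ext_getElem ?_ ?_
    · simp; omega
    · intro i hi1 hi2
      have hi4 : i < 4 := by simp at hi1; omega
      simp only [List.getElem_take, List.getElem_drop]
      interval_cases i <;> (simp; try rfl)
  rw [hslice, isAbbaA_four]
  rw [show ((n : Int) + 3) = (((n + 3 : Nat)) : Int) by push_cast; ring,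
    show ((n : Int) + 2) = (((n + 2 : Nat)) : Int) by push_cast; ring,
    show ((n : Int) + 1) = (((n + 1 : Nat)) : Int) by push_cast; ring]
  simp only [PySem.List.pyGet?_natCast]
  rw [List.getElem?_eq_getElem (by omega), List.getElem?_eq_getElem (by omega),
    List.getElem?_eq_getElem (by omega), List.getElem?_eq_getElem (by omega)]
  simp
  try rfl

theorem isAbbaA_eq_altCore (l : List Char) : isAbbaA l = isAbbaAltCore l := by
  by_cases h4 : l.length = 4
  · -- A's base case: the single window i = 0 of B's scan
    have h0 : (0 : Int) < (l.length : Int) - 3 := by omega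
    unfold isAbbaAltCore
    rw [show ((l.length : Int) - 3) = 0 + 1 by omega, PySem.List.pyRange_one_singleton]
    simp only [List.any_cons, List.any_nil, Bool.or_false]
    rw [← window_eq l 0 le_rfl (by omega)]
    have : PySem.List.slice l (some 0) (some (0 + 4)) = l := by
      rw [show ((0 : Int) + 4) = (((4 : Nat)) : Int) by norm_num]
      rw [show (some (0 : Int)) = some ((0 : Nat) : Int) by norm_num, PySem.List.slice_natCast]
      simp [List.take_of_length_le, h4]
    rw [this]
  · -- A's recursive case
    rw [isAbbaA, dif_neg h4]
    rw [Bool.eq_iff_iff]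
    unfold isAbbaAltCore
    simp only [List.any_eq_true, List.mem_attach, true_and, Subtype.exists]
    unfold isAbbaChildren
    rw [PySem.List.foldl_append_singleton_eq_map]
    simp only [List.nil_append, List.mem_map, exists_prop]
    constructor
    · rintro ⟨c, ⟨i, hi, rfl⟩, hP⟩
      rw [PySem.List.mem_pyRange_one] at hi
      exact ⟨i, by rw [PySem.List.mem_pyRange_one]; exact hi,
        by rw [← window_eq l i hi.1 hi.2]; exact hP⟩
    · rintro ⟨i, hi, hP⟩
      rw [PySem.List.mem_pyRange_one] at hi
      refine ⟨PySem.List.slice l (some i) (some (i + 4)), ⟨i, ?_, rfl⟩, ?_⟩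
      · rw [PySem.List.mem_pyRange_one]; exact hi
      · rw [window_eq l i hi.1 hi.2]; exact hP

-- ===== VERDICT (by name: the statement is the Claim_ definition above) =====
theorem is_abba_spec : Claim_equal_is_abba := by
  intro raw _
  unfold Spec_is_abba is_abba is_abba_alt
  exact isAbbaA_eq_altCore _
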